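-- pv_equiv track=rewrite | github.com/worldluoji/py-toolkit | src/excel/excel_operator.py | get_src_column_info
-- ===== SOURCE A (Python) =====
-- excel_col_alphabet_num_map = {
--     'A': 1, 'B': 2, 'C': 3, 'D': 4,
--     'E': 5, 'F': 6, 'G': 7, 'H': 8,
--     'I': 9, 'J': 10, 'K': 11, 'L': 12,
--     'M': 13, 'N': 14, 'O': 15, 'P': 16,
--     'Q': 17, 'R': 18, 'S': 19, 'T': 20,
--     'U': 21, 'V': 22, 'W': 23, 'X': 24,
--     'Y': 25, 'Z': 26,
-- }
--
-- BASE = 26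
--
-- def get_src_column_info(src_copy_column):
--     total = 0
--     start = -1
--     for part in src_copy_column.split(","):
--         src_copy_columns = part.split(":")
--         if len(src_copy_columns) == 1:
--             total += 1
--         else:
--             total += excel_column_alphabet_to_num(src_copy_columns[1]) - excel_column_alphabet_to_num(src_copy_columns[0]) + 1
--         if start == -1:
--             start = excel_column_alphabet_to_num(src_copy_columns[0]) - 1
--     return total, start
--
-- def excel_column_alphabet_to_num(s):
--     if isinstance(s, int):
--         return s
--     if not isinstance(s, str):
--         raise ValueError("s is not int or str")
--
--     c = 0
--     for i in range(0, len(s)):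
--         c += excel_col_alphabet_num_map[s[i]] * pow(BASE, len(s) - i - 1)
--     return c
-- ===== SOURCE B (Python) =====
-- def get_src_column_info(src_copy_column):
--     # single character-level state machine: no split(), no dict, no pow
--     total = 0
--     start = -1
--     seg = 0   # index of the colon-segment currently being read in this part
--     lo = 0    # Horner value of segment 0
--     hi = 0    # Horner value of segment 1
--     for ch in src_copy_column + ",":
--         if ch == ",":
--             total += 1 if seg == 0 else hi - lo + 1
--             if start == -1:
--                 start = lo - 1
--             seg = 0
--             lo = 0
--             hi = 0
--         elif ch == ":":
--             seg += 1
--         elif seg == 0: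
--             lo = lo * 26 + ord(ch) - 64
--         elif seg == 1:
--             hi = hi * 26 + ord(ch) - 64
--     return total, start
-- ===== Notes on version B (the rewrite author's own statement) =====
-- stated objective: alternative
-- what changed: B replaces A's two-level comma/colon split parsing with per-part dict lookups and pow(26, position) sums by a single character-level state machine over the string (with one appended comma sentinel) that accumulates each label's value by Horner steps (v = v*26 + ord(ch) - 64) and commits a part's contribution at each comma; Pre_ excludes exactly the inputs on which A raises KeyError (a character outside A-Z in a column label that A actually looks up).
import Mathlib
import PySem

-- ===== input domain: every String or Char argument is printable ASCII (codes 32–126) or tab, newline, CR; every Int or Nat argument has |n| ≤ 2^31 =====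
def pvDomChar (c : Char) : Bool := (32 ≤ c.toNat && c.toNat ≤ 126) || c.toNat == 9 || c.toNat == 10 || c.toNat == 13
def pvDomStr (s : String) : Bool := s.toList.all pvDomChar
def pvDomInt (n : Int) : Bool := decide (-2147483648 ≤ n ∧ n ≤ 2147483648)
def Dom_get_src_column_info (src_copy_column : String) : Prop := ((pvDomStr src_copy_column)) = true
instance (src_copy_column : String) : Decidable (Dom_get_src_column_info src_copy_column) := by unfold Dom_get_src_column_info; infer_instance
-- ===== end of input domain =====

-- B replaces A's split(',')/split(':') parsing with per-part dict lookups and pow(26, position)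
-- sums by a single character-level state machine (Horner accumulation, one appended ','
-- sentinel), a different traversal of the input (objective: alternative).

-- ===== PORT A =====
-- excel_col_alphabet_num_map
def excelColMap : PySem.Dict Char Int := PySem.Dict.ofList
  [('A', 1), ('B', 2), ('C', 3), ('D', 4), ('E', 5), ('F', 6), ('G', 7), ('H', 8),
   ('I', 9), ('J', 10), ('K', 11), ('L', 12), ('M', 13), ('N', 14), ('O', 15), ('P', 16),
   ('Q', 17), ('R', 18), ('S', 19), ('T', 20), ('U', 21), ('V', 22), ('W', 23), ('X', 24),
   ('Y', 25), ('Z', 26)]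

-- excel_column_alphabet_to_num (str case; the int case is unreachable from get_src_column_info).
-- Python raises KeyError on a char not in the map; `getD _ 0` stands in there and Pre_ excludes
-- exactly those inputs.
def colnumA (s : List Char) : Int :=
  (List.range s.length).foldl
    (fun c i => c + excelColMap.getD (s.getD i 'A') 0 * (26 : Int) ^ (s.length - i - 1)) 0

-- one iteration of A's `for part in src_copy_column.split(",")` loop
def stepA (acc : Int × Int) (part : List Char) : Int × Int :=
  let segs := PySem.Chars.splitOn part [':']
  let total := if segs.length = 1 then acc.1 + 1
    else acc.1 + colnumA (segs.getD 1 []) - colnumA (segs.getD 0 []) + 1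
  let start := if acc.2 = -1 then colnumA (segs.getD 0 []) - 1 else acc.2
  (total, start)

def get_src_column_info (src_copy_column : String) : Int × Int :=
  (PySem.Chars.splitOn src_copy_column.toList [',']).foldl stepA (0, -1)

-- ===== PORT B =====
-- B's per-character state machine: state (total, start, seg, lo, hi)
def scanStep (st : Int × Int × Int × Int × Int) (ch : Char) : Int × Int × Int × Int × Int :=
  match st with
  | (total, start, seg, lo, hi) =>
    if ch = ',' then
      (total + (if seg = 0 then 1 else hi - lo + 1),
       if start = -1 then lo - 1 else start, 0, 0, 0)
    else if ch = ':' then (total, start, seg + 1, lo, hi)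
    else if seg = 0 then (total, start, seg, lo * 26 + ((ch.toNat : Int) - 64), hi)
    else if seg = 1 then (total, start, seg, lo, hi * 26 + ((ch.toNat : Int) - 64))
    else (total, start, seg, lo, hi)

def get_src_column_info_alt (src_copy_column : String) : Int × Int :=
  let fin := (src_copy_column.toList ++ [',']).foldl scanStep (0, -1, 0, 0, 0)
  (fin.1, fin.2.1)

-- ===== PRECONDITION & SPEC =====
-- a would-be column label made of uppercase letters only (the keys of A's dict)
def upperOnly (t : List Char) : Bool :=
  t.all (fun ch => 'A' ≤ ch && ch ≤ 'Z')

-- Pre_ admits exactly the inputs on which A raises no KeyError: both labels of every ranged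
-- part are uppercase, and a plain part with other characters is only ever reached after some
-- part with a nonempty first label (A no longer looks plain parts up once `start` is set).
def Pre_get_src_column_info (src_copy_column : String) : Prop :=
  (let parts := PySem.Chars.splitOn src_copy_column.toList [',']
   (List.range parts.length).all (fun i =>
     let segs := PySem.Chars.splitOn (parts.getD i []) [':']
     if segs.length = 1 then
       upperOnly (parts.getD i []) ||
         (List.range i).any (fun j =>
           !((PySem.Chars.splitOn (parts.getD j []) [':']).getD 0 []).isEmpty)
     else upperOnly (segs.getD 0 []) && upperOnly (segs.getD 1 []))) = true

instance (src_copy_column : String) : Decidable (Pre_get_src_column_info src_copy_column) := by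
  unfold Pre_get_src_column_info; infer_instance

def pvWitness_get_src_column_info : String := "A"

def Spec_get_src_column_info (src_copy_column : String) (out : Int × Int) : Prop := out = get_src_column_info_alt src_copy_column
instance (src_copy_column : String) (out : Int × Int) : Decidable (Spec_get_src_column_info src_copy_column out) := by unfold Spec_get_src_column_info; infer_instance

-- ===== CLAIM (what is proved, stated in full; the proofs are below) =====
def Claim_equal_get_src_column_info : Prop := ∀ (src_copy_column : String), Dom_get_src_column_info src_copy_column → Pre_get_src_column_info src_copy_column → Spec_get_src_column_info src_copy_column (get_src_column_info src_copy_column)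

-- ===== LEMMAS AND PROOFS =====

-- simple structural recursion computing s.split(c) for a one-character separator
def splitC (c : Char) : List Char → List (List Char)
  | [] => [[]]
  | a :: t =>
    if a = c then [] :: splitC c t
    else
      match splitC c t with
      | [] => [[a]]
      | h :: r => (a :: h) :: r

theorem splitC_ne_nil (c : Char) (s : List Char) : splitC c s ≠ [] := by
  cases s with
  | nil => simp [splitC]
  | cons a t =>
    simp only [splitC]
    split <;> try simp
    split <;> simp

-- PySem's fuel-based splitOn.go, characterised through splitC
theorem go_eq_splitC (c : Char) :
    ∀ (fuel : Nat) (l cur : List Char) (acc : List (List Char)), l.length < fuel →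
    PySem.Chars.splitOn.go [c] fuel l cur acc
      = acc.reverse ++ (match splitC c l with
          | [] => [cur.reverse]
          | h :: r => (cur.reverse ++ h) :: r) := by
  intro fuel
  induction fuel with
  | zero => intro l cur acc h; omega
  | succ n ih =>
    intro l cur acc h
    cases l with
    | nil =>
      simp [PySem.Chars.splitOn.go, splitC]
    | cons a t =>
      simp only [PySem.Chars.splitOn.go]
      by_cases hac : c = a
      · have hpre : [c].isPrefixOf (a :: t) = true := by
          simp [List.isPrefixOf, hac]
        rw [if_pos hpre]
        simp only [List.length_cons] at h
        rw [ih (List.drop [c].length (a :: t)) [] (cur.reverse :: acc) (by simp; omega)]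
        simp only [List.length_cons, List.length_nil, List.drop_succ_cons, List.drop_zero,
          List.reverse_cons, List.reverse_nil]
        have : splitC c (a :: t) = [] :: splitC c t := by
          simp [splitC, hac.symm]
        rw [this]
        cases hsp : splitC c t with
        | nil => exact absurd hsp (splitC_ne_nil c t)
        | cons h' r' => simp
      · have hpre : [c].isPrefixOf (a :: t) = false := by
          simp [List.isPrefixOf, hac]
        rw [if_neg (by simp [hpre])]
        simp only [List.length_cons] at h
        rw [ih t (a :: cur) acc (by omega)]
        have : splitC c (a :: t)
            = match splitC c t with
              | [] => [[a]]
              | h :: r => (a :: h) :: r := by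
          have hne : ¬ a = c := fun hh => hac hh.symm
          simp [splitC, hne]
        rw [this]
        cases hsp : splitC c t with
        | nil => exact absurd hsp (splitC_ne_nil c t)
        | cons h' r' => simp

theorem splitOn_eq_splitC (c : Char) (s : List Char) :
    PySem.Chars.splitOn s [c] = splitC c s := by
  have := go_eq_splitC c (s.length + 1) s [] [] (by omega)
  rw [PySem.Chars.splitOn] at *
  rw [this]
  cases hsp : splitC c s with
  | nil => exact absurd hsp (splitC_ne_nil c s)
  | cons h r => simp

-- the characters of each piece never contain the separator
theorem not_mem_of_mem_splitC (c : Char) (s : List Char) :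
    ∀ p ∈ splitC c s, c ∉ p := by
  induction s with
  | nil => simp [splitC]
  | cons a t ih =>
    intro p hp
    simp only [splitC] at hp
    by_cases hac : a = c
    · rw [if_pos hac] at hp
      rcases List.mem_cons.mp hp with h | h
      · simp [h]
      · exact ih p h
    · rw [if_neg hac] at hp
      cases hsp : splitC c t with
      | nil => exact absurd hsp (splitC_ne_nil c t)
      | cons h' r' =>
        rw [hsp] at hp
        rcases List.mem_cons.mp hp with h | h
        · subst h
          intro hmem
          rcases List.mem_cons.mp hmem with h | h
          · exact hac h.symm
          · exact ih h' (by rw [hsp]; exact List.mem_cons_self) h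
        · exact ih p (by rw [hsp]; exact List.mem_cons_of_mem _ h)

-- reassembling: s with a trailing separator is the concatenation of its pieces, each + sep
theorem append_sep_eq_flatten (c : Char) (s : List Char) :
    s ++ [c] = ((splitC c s).map (· ++ [c])).flatten := by
  induction s with
  | nil => simp [splitC]
  | cons a t ih =>
    simp only [splitC]
    by_cases hac : a = c
    · rw [if_pos hac]
      simp [hac, ih]
    · rw [if_neg hac]
      cases hsp : splitC c t with
      | nil => exact absurd hsp (splitC_ne_nil c t)
      | cons h' r' =>
        rw [hsp] at ih
        simp only [List.map_cons, List.flatten_cons] at ih ⊢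
        simp [← List.append_assoc, ← ih]

-- the chars before the first / between the first and second occurrence of c
def preSeg (c : Char) : List Char → List Char
  | [] => []
  | a :: t => if a = c then [] else a :: preSeg c t

def midSeg (c : Char) : List Char → List Char
  | [] => []
  | a :: t => if a = c then preSeg c t else midSeg c t

theorem splitC_getD_zero (c : Char) (s : List Char) :
    (splitC c s).getD 0 [] = preSeg c s := by
  induction s with
  | nil => simp [splitC, preSeg]
  | cons a t ih =>
    simp only [splitC, preSeg]
    by_cases hac : a = c
    · simp [hac]
    · rw [if_neg hac, if_neg hac]
      cases hsp : splitC c t with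
      | nil => exact absurd hsp (splitC_ne_nil c t)
      | cons h' r' =>
        rw [hsp] at ih
        simpa using congrArg (a :: ·) ih

theorem splitC_getD_one (c : Char) (s : List Char) :
    (splitC c s).getD 1 [] = midSeg c s := by
  induction s with
  | nil => simp [splitC, midSeg]
  | cons a t ih =>
    simp only [splitC, midSeg]
    by_cases hac : a = c
    · rw [if_pos hac, if_pos hac]
      simpa using splitC_getD_zero c t
    · rw [if_neg hac, if_neg hac]
      cases hsp : splitC c t with
      | nil => exact absurd hsp (splitC_ne_nil c t)
      | cons h' r' =>
        rw [hsp] at ih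
        simpa using ih

theorem splitC_length (c : Char) (s : List Char) :
    (splitC c s).length = s.count c + 1 := by
  induction s with
  | nil => simp [splitC]
  | cons a t ih =>
    simp only [splitC]
    by_cases hac : a = c
    · rw [if_pos hac]
      simp [List.count_cons, hac, ih]
    · rw [if_neg hac]
      cases hsp : splitC c t with
      | nil => exact absurd hsp (splitC_ne_nil c t)
      | cons h' r' =>
        rw [hsp] at ih
        simp only [List.length_cons] at ih ⊢
        simp [List.count_cons, fun h => hac h, ih]

-- Horner evaluation, as B performs it
def horner (a : Int) (s : List Char) : Int :=
  s.foldl (fun c ch => c * 26 + ((ch.toNat : Int) - 64)) a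

-- propositional reading of `upperOnly`
def UpperP (t : List Char) : Prop := ∀ ch ∈ t, 65 ≤ ch.toNat ∧ ch.toNat ≤ 90

theorem upperP_of_upperOnly (t : List Char) (h : upperOnly t = true) : UpperP t := by
  intro ch hch
  unfold upperOnly at h
  rw [List.all_eq_true] at h
  have hc := h ch hch
  simp only [Bool.and_eq_true, decide_eq_true_eq] at hc
  obtain ⟨h1, h2⟩ := hc
  rw [Char.le_def, UInt32.le_iff_toNat_le] at h1 h2
  exact ⟨h1, h2⟩

-- value of a digit list, most significant first
def colPoly : List Int → Int
  | [] => 0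
  | d :: t => d * (26 : Int) ^ t.length + colPoly t

theorem horner_eq (l : List Int) (a : Int) :
    l.foldl (fun c d => c * 26 + d) a = a * (26 : Int) ^ l.length + colPoly l := by
  induction l generalizing a with
  | nil => simp [colPoly]
  | cons d t ih =>
    simp only [List.foldl_cons, ih, colPoly, List.length_cons]
    ring

theorem horner_eq_poly (s : List Char) :
    horner 0 s = colPoly (s.map (fun ch => ((ch.toNat : Int) - 64))) := by
  unfold horner
  rw [← List.foldl_map]
  simpa using horner_eq (s.map (fun ch => ((ch.toNat : Int) - 64))) 0

theorem rangeSum_eq_poly (l : List Int) (k : Nat) :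
    ((List.range l.length).map (fun i => l.getD i 0 * (26 : Int) ^ (l.length - 1 - i + k))).sum
      = colPoly l * (26 : Int) ^ k := by
  induction l generalizing k with
  | nil => simp [colPoly]
  | cons d t ih =>
    rw [List.length_cons, List.range_succ_eq_map, List.map_cons, List.map_map, List.sum_cons]
    have h2 : ((List.range t.length).map
        ((fun i => (d :: t).getD i 0 * (26 : Int) ^ (t.length + 1 - 1 - i + k)) ∘ Nat.succ)).sum
        = colPoly t * (26 : Int) ^ k := by
      rw [← ih k]
      refine congrArg List.sum (List.map_congr_left ?_)
      intro i hi
      simp only [Function.comp, List.getD_cons_succ]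
      have hx : t.length + 1 - 1 - (i + 1) + k = t.length - 1 - i + k := by omega
      rw [hx]
    rw [h2]
    simp only [List.getD_cons_zero, colPoly]
    have hx : t.length + 1 - 1 - 0 + k = t.length + k := by omega
    rw [hx, pow_add]
    ring

theorem digit_of_upper (ch : Char) (h1 : 65 ≤ ch.toNat) (h2 : ch.toNat ≤ 90) :
    excelColMap.getD ch 0 = ((ch.toNat : Int) - 64) := by
  obtain ⟨n, hn⟩ : ∃ n, ch.toNat = n := ⟨_, rfl⟩
  rw [hn] at h1 h2
  have hofnat := Char.ofNat_toNat ch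
  interval_cases n <;> (rw [← hofnat, hn]; decide)

theorem colnum_eq (s : List Char) (hs : UpperP s) : colnumA s = horner 0 s := by
  unfold colnumA
  rw [PySem.List.foldl_add (List.range s.length)
    (fun i => excelColMap.getD (s.getD i 'A') 0 * (26 : Int) ^ (s.length - i - 1)) 0]
  rw [horner_eq_poly]
  have hmap : (List.range s.length).map
      (fun i => excelColMap.getD (s.getD i 'A') 0 * (26 : Int) ^ (s.length - i - 1))
      = (List.range (s.map (fun ch => ((ch.toNat : Int) - 64))).length).map
        (fun i => (s.map (fun ch => ((ch.toNat : Int) - 64))).getD i 0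
          * (26 : Int) ^ ((s.map (fun ch => ((ch.toNat : Int) - 64))).length - 1 - i + 0)) := by
    rw [List.length_map]
    refine List.map_congr_left ?_
    intro i hi
    rw [List.mem_range] at hi
    have h1 : s.getD i 'A' = s[i]'hi := List.getD_eq_getElem s 'A' hi
    have h2 : (s.map (fun ch => ((ch.toNat : Int) - 64))).getD i 0
        = ((s[i]'hi).toNat : Int) - 64 := by
      rw [List.getD_eq_getElem _ 0 (by simpa using hi)]
      simp
    have hx : s.length - 1 - i + 0 = s.length - i - 1 := by omega
    obtain ⟨hu1, hu2⟩ := hs _ (List.getElem_mem hi)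
    rw [h1, h2, digit_of_upper _ hu1 hu2, hx]
  rw [hmap, rangeSum_eq_poly]
  simp

theorem horner_pos (s : List Char) (hs : UpperP s) (hne : s ≠ []) : 1 ≤ horner 0 s := by
  rw [horner_eq_poly]
  have key : ∀ (l : List Char), UpperP l → 0 ≤ colPoly (l.map (fun ch => ((ch.toNat : Int) - 64))) := by
    intro l hl
    induction l with
    | nil => simp [colPoly]
    | cons c t ih =>
      simp only [List.map_cons, colPoly]
      have h1 : 1 ≤ ((c.toNat : Int) - 64) := by
        have := (hl c (List.mem_cons_self)).1; omega
      have h2 := ih (fun x hx => hl x (List.mem_cons_of_mem _ hx))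
      have h3 : (0 : Int) < (26 : Int) ^ (t.map (fun ch => ((ch.toNat : Int) - 64))).length :=
        pow_pos (by norm_num) _
      nlinarith
  cases s with
  | nil => exact absurd rfl hne
  | cons c t =>
    simp only [List.map_cons, colPoly]
    have h1 : 1 ≤ ((c.toNat : Int) - 64) := by
      have := (hs c (List.mem_cons_self)).1; omega
    have h2 := key t (fun x hx => hs x (List.mem_cons_of_mem _ hx))
    have h3 : (0 : Int) < (26 : Int) ^ (t.map (fun ch => ((ch.toNat : Int) - 64))).length :=
      pow_pos (by norm_num) _
    have h4 : (1 : Int) ≤ (26 : Int) ^ (t.map (fun ch => ((ch.toNat : Int) - 64))).length := by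
      omega
    nlinarith

-- the common specification step both folds reduce to
def specStep (st : Int × Int) (p : List Char) : Int × Int :=
  (st.1 + (if p.count ':' = 0 then 1
           else horner 0 (midSeg ':' p) - horner 0 (preSeg ':' p) + 1),
   if st.2 = -1 then horner 0 (preSeg ':' p) - 1 else st.2)

-- ===== scanner (B) side =====

theorem scan_seg_ge_two (p : List Char) (hp : (',' : Char) ∉ p) :
    ∀ (t s g lo hi : Int), g ≠ 0 → g ≠ 1 → 0 ≤ g →
    p.foldl scanStep (t, s, g, lo, hi) = (t, s, g + (p.count ':' : Int), lo, hi) := by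
  induction p with
  | nil => intro t s g lo hi _ _ _; simp
  | cons a q ih =>
    intro t s g lo hi hg0 hg1 hgn
    have hpa : a ≠ ',' := fun h => hp (h ▸ List.mem_cons_self)
    have hq : (',' : Char) ∉ q := fun h => hp (List.mem_cons_of_mem _ h)
    by_cases hcol : a = ':'
    · simp only [List.foldl_cons, scanStep, if_neg hpa, if_pos hcol]
      rw [ih hq t s (g + 1) lo hi (by omega) (by omega) (by omega)]
      simp [List.count_cons, hcol]
      ring
    · simp only [List.foldl_cons, scanStep, if_neg hpa, if_neg hcol, if_neg hg0, if_neg hg1]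
      rw [ih hq t s g lo hi hg0 hg1 hgn]
      simp [List.count_cons, hcol]

theorem scan_seg_one (p : List Char) (hp : (',' : Char) ∉ p) :
    ∀ (t s lo hi : Int),
    p.foldl scanStep (t, s, 1, lo, hi)
      = (t, s, 1 + (p.count ':' : Int), lo, horner hi (preSeg ':' p)) := by
  induction p with
  | nil => intro t s lo hi; simp [preSeg, horner]
  | cons a q ih =>
    intro t s lo hi
    have hpa : a ≠ ',' := fun h => hp (h ▸ List.mem_cons_self)
    have hq : (',' : Char) ∉ q := fun h => hp (List.mem_cons_of_mem _ h)
    by_cases hcol : a = ':'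
    · simp only [List.foldl_cons, scanStep, if_neg hpa, if_pos hcol]
      rw [scan_seg_ge_two q hq t s (1 + 1) lo hi (by omega) (by omega) (by omega)]
      simp [List.count_cons, hcol, preSeg, horner]
      ring
    · simp only [List.foldl_cons, scanStep, if_neg hpa, if_neg hcol,
        if_neg (by omega : ¬ (1:Int) = 0), if_pos rfl, if_true]
      rw [ih hq]
      simp [List.count_cons, hcol, preSeg, horner]

theorem scan_seg_zero (p : List Char) (hp : (',' : Char) ∉ p) :
    ∀ (t s lo hi : Int),
    p.foldl scanStep (t, s, 0, lo, hi)
      = (t, s, (p.count ':' : Int), horner lo (preSeg ':' p),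
          if p.count ':' = 0 then hi else horner hi (midSeg ':' p)) := by
  induction p with
  | nil => intro t s lo hi; simp [preSeg, midSeg, horner]
  | cons a q ih =>
    intro t s lo hi
    have hpa : a ≠ ',' := fun h => hp (h ▸ List.mem_cons_self)
    have hq : (',' : Char) ∉ q := fun h => hp (List.mem_cons_of_mem _ h)
    by_cases hcol : a = ':'
    · simp only [List.foldl_cons, scanStep, if_neg hpa, if_pos hcol, zero_add]
      rw [scan_seg_one q hq t s lo hi]
      simp [List.count_cons, hcol, preSeg, midSeg, horner]
      omega
    · simp only [List.foldl_cons, scanStep, if_neg hpa, if_neg hcol, if_pos rfl, if_true]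
      rw [ih hq]
      simp [List.count_cons, hcol, preSeg, midSeg, horner]

-- scanning one piece followed by its ',' sentinel performs exactly one specStep
theorem scan_piece (p : List Char) (hp : (',' : Char) ∉ p) (t s : Int) :
    (p ++ [',']).foldl scanStep (t, s, 0, 0, 0)
      = ((specStep (t, s) p).1, (specStep (t, s) p).2, 0, 0, 0) := by
  rw [List.foldl_append, scan_seg_zero p hp t s 0 0]
  by_cases hc : p.count ':' = 0
  · simp [scanStep, specStep, hc, horner]
  · have : ((p.count ':' : Int)) ≠ 0 := by exact_mod_cast hc
    simp [scanStep, specStep, hc, this]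

theorem scan_pieces (l : List (List Char)) (hl : ∀ p ∈ l, (',' : Char) ∉ p) :
    ∀ (t s : Int),
    ((l.map (· ++ [','])).flatten).foldl scanStep (t, s, 0, 0, 0)
      = ((l.foldl specStep (t, s)).1, (l.foldl specStep (t, s)).2, 0, 0, 0) := by
  induction l with
  | nil => intro t s; simp
  | cons p rest ih =>
    intro t s
    rw [List.map_cons, List.flatten_cons, List.foldl_append,
      scan_piece p (hl p List.mem_cons_self) t s,
      ih (fun q hq => hl q (List.mem_cons_of_mem _ hq))]
    simp

-- ===== A side =====

-- per-part conditions extracted from Pre_: ranged parts have uppercase labels, and a plain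
-- non-uppercase part is preceded by a part with a nonempty first label
def RangedUpper (l : List (List Char)) : Prop :=
  ∀ p ∈ l, p.count ':' ≠ 0 → UpperP (preSeg ':' p) ∧ UpperP (midSeg ':' p)

def PlainGuard (l : List (List Char)) : Prop :=
  ∀ i (hi : i < l.length), l[i].count ':' = 0 → ¬ UpperP l[i] →
    ∃ j, ∃ (hj : j < l.length), j < i ∧ preSeg ':' l[j] ≠ []

theorem stepA_eq_specStep (st : Int × Int) (p : List Char)
    (hup : p.count ':' ≠ 0 → UpperP (preSeg ':' p) ∧ UpperP (midSeg ':' p))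
    (hstart : st.2 = -1 → UpperP (preSeg ':' p)) :
    stepA st p = specStep st p := by
  simp only [stepA, specStep]
  rw [splitOn_eq_splitC, splitC_getD_zero, splitC_getD_one, splitC_length]
  by_cases hc : p.count ':' = 0
  · simp only [hc, if_pos rfl, reduceIte]
    by_cases hs : st.2 = -1
    · rw [if_pos hs, if_pos hs, colnum_eq _ (hstart hs)]
    · rw [if_neg hs, if_neg hs]
  · have h1 : p.count ':' + 1 ≠ 1 := by omega
    obtain ⟨hu0, hu1⟩ := hup hc
    rw [if_neg h1, if_neg hc, colnum_eq _ hu0, colnum_eq _ hu1]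
    by_cases hs : st.2 = -1
    · rw [if_pos hs]
      simp only [Prod.mk.injEq]
      exact ⟨by ring, trivial⟩
    · rw [if_neg hs]
      simp only [Prod.mk.injEq]
      exact ⟨by ring, trivial⟩

-- A's fold equals the spec fold under Pre_'s per-part conditions, carrying the invariant
-- "start = -1 → every earlier first label was empty"
theorem foldA_eq_spec (l : List (List Char)) :
    ∀ (t s : Int), RangedUpper l → (s = -1 → PlainGuard l) →
    l.foldl stepA (t, s) = l.foldl specStep (t, s) := by
  induction l with
  | nil => intro t s _ _; simp
  | cons p rest ih =>
    intro t s hru hpg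
    have hru' : RangedUpper rest := fun q hq => hru q (List.mem_cons_of_mem _ hq)
    have hupp : p.count ':' ≠ 0 → UpperP (preSeg ':' p) ∧ UpperP (midSeg ':' p) :=
      hru p List.mem_cons_self
    have hstart : s = -1 → UpperP (preSeg ':' p) := by
      intro hs
      by_cases hc : p.count ':' = 0
      · -- plain part: preSeg ':' p = p, and PlainGuard at i = 0 forces UpperP p
        have hpre : preSeg ':' p = p := by
          clear hupp hru hru' hpg ih
          induction p with
          | nil => simp [preSeg]
          | cons a q ihq =>
            simp only [List.count_cons] at hc
            have ha : a ≠ ':' := by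
              intro h; simp [h] at hc
            simp only [preSeg, if_neg ha]
            rw [ihq (by simpa [ha] using hc)]
        rw [hpre]
        by_contra hnu
        obtain ⟨j, hj, hj0, _⟩ := hpg hs 0 (by simp) (by simpa [hpre] using hc) (by simpa [hpre] using hnu)
        omega
      · exact (hupp hc).1
    rw [List.foldl_cons, List.foldl_cons, stepA_eq_specStep (t, s) p hupp hstart]
    apply ih
    · exact hru'
    · -- if start is still -1 after this part, p's first label was empty
      intro hs2
      have hs : s = -1 := by
        by_contra hsne
        simp only [specStep, if_neg hsne] at hs2
        exact hsne hs2
      have hpre0 : preSeg ':' p = [] := by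
        simp only [specStep, if_pos hs] at hs2
        by_contra hne
        have := horner_pos (preSeg ':' p) (hstart hs) hne
        omega
      intro i hi hci hni
      obtain ⟨j, hj, hj1, hj2⟩ := hpg hs (i + 1) (by simpa using Nat.succ_lt_succ hi)
        (by simpa using hci) (by simpa using hni)
      cases j with
      | zero => exact absurd (by simpa using hj2) (by simp [hpre0])
      | succ j' =>
        refine ⟨j', by simpa using Nat.lt_of_succ_lt_succ hj, by omega, by simpa using hj2⟩

-- unpacking the Boolean Pre_ into the two propositional conditions
theorem pre_unpack (str : String) (h : Pre_get_src_column_info str) :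
    RangedUpper (splitC ',' str.toList) ∧ PlainGuard (splitC ',' str.toList) := by
  unfold Pre_get_src_column_info at h
  rw [splitOn_eq_splitC] at h
  rw [List.all_eq_true] at h
  constructor
  · intro p hp hc
    obtain ⟨i, hi, hpi⟩ := List.mem_iff_getElem.mp hp
    have hx := h i (List.mem_range.mpr hi)
    simp only [splitOn_eq_splitC, List.getD_eq_getElem _ _ hi, hpi] at hx
    rw [splitC_length] at hx
    have hne : p.count ':' + 1 ≠ 1 := by omega
    simp only [if_neg hne, Bool.and_eq_true] at hx
    rw [splitC_getD_zero, splitC_getD_one] at hx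
    exact ⟨upperP_of_upperOnly _ hx.1, upperP_of_upperOnly _ hx.2⟩
  · intro i hi hci hui
    have hx := h i (List.mem_range.mpr hi)
    simp only [splitOn_eq_splitC, List.getD_eq_getElem _ _ hi] at hx
    rw [splitC_length] at hx
    simp only [hci] at hx
    cases hu : upperOnly ((splitC ',' str.toList)[i]) with
    | true => exact absurd (upperP_of_upperOnly _ hu) hui
    | false =>
      rw [hu] at hx
      simp only [if_true, Bool.false_or] at hx
      rw [List.any_eq_true] at hx
      obtain ⟨j, hjmem, hjx⟩ := hx
      rw [List.mem_range] at hjmem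
      have hj : j < (splitC ',' str.toList).length := by omega
      refine ⟨j, hj, hjmem, ?_⟩
      simp only [splitOn_eq_splitC, List.getD_eq_getElem _ _ hj, splitC_getD_zero,
        Bool.not_eq_eq_eq_not, Bool.not_true, List.isEmpty_eq_false_iff] at hjx
      exact hjx

-- ===== VERDICT (by name: the statement is the Claim_ definition above) =====
theorem get_src_column_info_spec : Claim_equal_get_src_column_info := by
  intro str _ hpre
  obtain ⟨hru, hpg⟩ := pre_unpack str hpre
  unfold Spec_get_src_column_info get_src_column_info get_src_column_info_alt
  rw [splitOn_eq_splitC, append_sep_eq_flatten ',' str.toList,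
    scan_pieces _ (not_mem_of_mem_splitC ',' str.toList),
    foldA_eq_spec _ 0 (-1) hru (fun _ => hpg)]
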